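-- pv_equiv track=rewrite | github.com/swh00tw/Leetcode | 1980.find-unique-binary-string.py | findDifferentBinaryString
-- ===== SOURCE A (Python) =====
-- from typing import List
--
-- def findDifferentBinaryString(nums: List[str]) -> str:
--     # solution 1
--     # we just alter bit from each character
--     # since we flip a bit from each character, we can prove that the answer must be different from each of them
--     # don't believe?
--     # we alter the 1st bit from 1st b_str --> guarantee different from 1st b_str
--     # we alter the 2nd bit from 2nd b_str --> guarantee different from 2nd b_str
--     # we alter the 3rd bit from 3rd b_str --> guarantee different from 3rd b_str
--     # ...
--     # we alter the nth bit from nth b_str --> guarantee different from nth b_str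
--     ans = []
--     n = len(nums)
--     for i in range(n):
--         if nums[i][i] == "1":
--             ans.append("0")
--         else:
--             ans.append("1")
--     return "".join(ans)
-- ===== SOURCE B (Python) =====
-- from typing import List
--
-- def findDifferentBinaryString(nums: List[str]) -> str:
--     # Recursive minor-peeling: flip the first row's first bit, then recurse on the
--     # submatrix obtained by dropping the first row and the first column.
--     if not nums:
--         return ''
--     first = '0' if nums[0][0] == '1' else '1'
--     return first + findDifferentBinaryString([row[1:] for row in nums[1:]])
-- ===== Notes on version B (the rewrite author's own statement) =====
-- stated objective: alternative
-- what changed: A iterates over indices accumulating flipped diagonal characters into a list it joins; B is index-free structural recursion on the matrix: flip the first row's first bit and recurse on the minor obtained by dropping the first row and first column.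
import Mathlib
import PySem

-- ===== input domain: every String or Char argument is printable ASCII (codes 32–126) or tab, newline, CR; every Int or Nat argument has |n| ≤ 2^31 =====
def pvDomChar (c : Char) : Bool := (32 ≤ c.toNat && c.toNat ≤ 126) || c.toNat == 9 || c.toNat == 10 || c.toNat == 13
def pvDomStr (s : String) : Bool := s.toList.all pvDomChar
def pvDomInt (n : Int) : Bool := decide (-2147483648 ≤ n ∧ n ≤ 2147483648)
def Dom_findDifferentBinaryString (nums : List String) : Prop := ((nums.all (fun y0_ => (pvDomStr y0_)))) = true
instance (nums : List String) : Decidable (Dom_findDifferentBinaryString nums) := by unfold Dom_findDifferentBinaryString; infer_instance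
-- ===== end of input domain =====

-- B replaces A's indexed flip-and-append loop by index-free structural recursion on
-- the matrix (flip the first row's first bit, recurse on the minor without first
-- row/column); objective: alternative decomposition, same result.


-- ===== PORT A =====
def findDifferentBinaryString (nums : List String) : String :=
  let n : Int := PySem.List.len nums
  let ans : List String :=
    (PySem.List.pyRange 0 n 1).foldl
      (fun ans i =>
        if (PySem.Str.pyGet? (PySem.List.pyGetD nums i "") i).getD ' ' == '1'
        then ans ++ ["0"]
        else ans ++ ["1"])
      []
  PySem.Str.join "" ans

-- ===== PORT B =====
def findDifferentBinaryString_alt (nums : List String) : String :=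
  match nums with
  | [] => ""
  | r :: rest =>
      (if (PySem.Str.pyGet? r 0).getD ' ' == '1' then "0" else "1")
        ++ findDifferentBinaryString_alt (rest.map (fun row => PySem.Str.slice row (some 1) none))
termination_by nums.length
decreasing_by simp

-- ===== PRECONDITION & SPEC =====
-- Pre_ excludes exactly the inputs where Python A raises IndexError: some row i is too
-- short to have a character at index i.
def Pre_findDifferentBinaryString (nums : List String) : Prop :=
  ∀ i : Nat, i < nums.length → i < (nums.getD i "").toList.length
instance (nums : List String) : Decidable (Pre_findDifferentBinaryString nums) := by
  unfold Pre_findDifferentBinaryString; infer_instance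

def pvWitness_findDifferentBinaryString : List String := ["0"]

def Spec_findDifferentBinaryString (nums : List String) (out : String) : Prop :=
  out = findDifferentBinaryString_alt nums
instance (nums : List String) (out : String) : Decidable (Spec_findDifferentBinaryString nums out) := by
  unfold Spec_findDifferentBinaryString; infer_instance

-- ===== CLAIM (what is proved, stated in full; the proofs are below) =====
def Claim_equal_findDifferentBinaryString : Prop :=
  ∀ (nums : List String), Dom_findDifferentBinaryString nums →
    Pre_findDifferentBinaryString nums →
    Spec_findDifferentBinaryString nums (findDifferentBinaryString nums)

-- ===== LEMMAS AND PROOFS =====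

-- the i-th output character both programs produce: flip of the diagonal character
def pvBit (nums : List String) (i : Nat) : Bool :=
  !(((nums.getD i "").toList[i]?).getD ' ' == '1')

def pvBitChar (b : Bool) : Char := if b then '1' else '0'

-- A's result, characterised
theorem pvA_toList (nums : List String) :
    (findDifferentBinaryString nums).toList
      = (List.range nums.length).map (fun i => pvBitChar (pvBit nums i)) := by
  simp only [findDifferentBinaryString, PySem.List.len_eq, PySem.List.pyRange_zero_natCast,
    List.foldl_map]
  rw [PySem.List.foldl_congr_mem (List.range nums.length) _
      (fun (ans : List String) (i : Nat) => ans ++ [String.ofList [pvBitChar (pvBit nums i)]]) []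
      (by
        intro acc i _
        simp only [PySem.List.pyGetD_natCast, PySem.Str.pyGet?_natCast, pvBit, pvBitChar,
          List.getD_eq_getElem?_getD]
        by_cases hc : ((nums[i]?.getD "").toList[i]?).getD ' ' = '1' <;> simp [hc])]
  rw [PySem.List.foldl_append_singleton_eq_map
      (fun i => String.ofList [pvBitChar (pvBit nums i)]) (List.range nums.length) []]
  rw [List.nil_append, PySem.Str.toList_join]
  rw [show ("" : String).toList = ([] : List Char) from rfl]
  rw [List.map_map]
  rw [show (List.range nums.length).map (String.toList ∘ fun i => String.ofList [pvBitChar (pvBit nums i)])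
        = ((List.range nums.length).map (fun i => pvBitChar (pvBit nums i))).map (fun c => [c]) by
      simp [Function.comp]]
  exact PySem.Chars.join_nil_singletons _

-- the minor's bit i is the full matrix's bit i+1
theorem pvBit_minor (r : String) (rest : List String) (i : Nat) :
    pvBit (rest.map (fun row => PySem.Str.slice row (some 1) none)) i
      = pvBit (r :: rest) (i + 1) := by
  unfold pvBit
  rw [show (r :: rest).getD (i + 1) "" = rest.getD i "" from rfl]
  by_cases hi : i < rest.length
  · have h1 : (rest.map (fun row => PySem.Str.slice row (some 1) none)).getD i ""
        = PySem.Str.slice rest[i] (some 1) none := by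
      rw [List.getD_eq_getElem?_getD, List.getElem?_map, List.getElem?_eq_getElem hi]; rfl
    have h2 : rest.getD i "" = rest[i] := by
      rw [List.getD_eq_getElem?_getD, List.getElem?_eq_getElem hi]; rfl
    rw [h1, h2]
    have hsl : (PySem.Str.slice rest[i] (some 1) none).toList = rest[i].toList.drop 1 := by
      rw [PySem.Str.toList_slice]
      rw [show (some (1 : Int)) = some ((1 : Nat) : Int) from rfl]
      exact PySem.List.slice_from_natCast rest[i].toList 1
    rw [hsl]
    rw [show (rest[i].toList.drop 1)[i]? = rest[i].toList[i + 1]? by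
      rw [List.getElem?_drop, Nat.add_comm]]
  · have hle : rest.length ≤ i := Nat.le_of_not_lt hi
    have h1 : (rest.map (fun row => PySem.Str.slice row (some 1) none)).getD i "" = "" := by
      rw [List.getD_eq_getElem?_getD, List.getElem?_eq_none (by simpa using hle)]; rfl
    have h2 : rest.getD i "" = "" := by
      rw [List.getD_eq_getElem?_getD, List.getElem?_eq_none hle]; rfl
    rw [h1, h2]
    simp

-- B's result, characterised (same right-hand side as A's)
theorem pvB_toList (n : Nat) (nums : List String) (hn : nums.length = n) :
    (findDifferentBinaryString_alt nums).toList
      = (List.range nums.length).map (fun i => pvBitChar (pvBit nums i)) := by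
  induction n generalizing nums with
  | zero =>
      have h0 : nums = [] := List.length_eq_zero_iff.mp hn
      subst h0
      simp [findDifferentBinaryString_alt]
  | succ m ih =>
      match nums with
      | r :: rest =>
        have hm : rest.length = m := by simpa using hn
        rw [findDifferentBinaryString_alt, String.toList_append,
          ih (rest.map (fun row => PySem.Str.slice row (some 1) none)) (by simpa using hm)]
        have hget : PySem.Str.pyGet? r 0 = r.toList[0]? := by
          rw [show (0 : Int) = ((0 : Nat) : Int) from rfl, PySem.Str.pyGet?_natCast]
        have htail : (List.range rest.length).map
              (fun i => pvBitChar (pvBit (rest.map (fun row => PySem.Str.slice row (some 1) none)) i))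
            = (List.range rest.length).map
              (fun i => pvBitChar (pvBit (r :: rest) (i + 1))) := by
          apply List.map_congr_left
          intro i _
          rw [pvBit_minor r rest i]
        have hhead : (if ((PySem.Str.pyGet? r 0).getD ' ' == '1') = true then "0" else "1").toList
            = [pvBitChar (pvBit (r :: rest) 0)] := by
          rw [hget]
          by_cases hc : r.toList[0]?.getD ' ' = '1' <;> simp [pvBit, pvBitChar, hc]
        rw [hhead]
        simp only [List.length_map]
        rw [htail]
        rw [show (r :: rest).length = rest.length + 1 from rfl, List.range_succ_eq_map,
          List.map_cons, List.map_map]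
        simp [Function.comp, Nat.succ_eq_add_one]

-- ===== VERDICT (by name: the statement is the Claim_ definition above) =====
theorem findDifferentBinaryString_spec : Claim_equal_findDifferentBinaryString := by
  intro nums _ _
  unfold Spec_findDifferentBinaryString
  apply String.toList_inj.mp
  rw [pvA_toList, pvB_toList nums.length nums rfl]
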